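-- pv_equiv track=rewrite | github.com/RonitJ7/inlp_ass_1 | tokenizers.py | whitespace_tokenizer
-- ===== SOURCE A (Python) =====
-- import unicodedata
--
-- def _is_word_char(ch: str) -> bool:
--     # Letters (L*), Marks (M*), Numbers (N*)
--     return unicodedata.category(ch)[0] in {"L", "M", "N"}
--
-- def whitespace_tokenizer(lines):
--     """Tokenizes lines into tokens based on whitespace and character types."""
--     tokens = []
--     for line in lines:
--         buf = []
--         sent = []
--         for ch in line:
--             if ch.isspace():
--                 if buf:
--                     sent.append("".join(buf))
--                     buf = []
--             elif _is_word_char(ch):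
--                 buf.append(ch)
--             else:
--                 if buf:
--                     sent.append("".join(buf))
--                     buf = []
--                 sent.append(ch)
--         if buf:
--             sent.append("".join(buf))
--
--         tokens.append(sent)
--
--     return tokens
-- ===== SOURCE B (Python) =====
-- import unicodedata
--
-- def _is_word_char(ch: str) -> bool:
--     # Letters (L*), Marks (M*), Numbers (N*)
--     return unicodedata.category(ch)[0] in {"L", "M", "N"}
--
-- def whitespace_tokenizer(lines):
--     """Tokenizes lines into tokens based on whitespace and character types.
--
--     Two-phase: split each line on whitespace runs, then cut each chunk into
--     maximal word-character spans and single non-word characters."""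
--     tokens = []
--     for line in lines:
--         sent = []
--         for chunk in line.split():
--             i, n = 0, len(chunk)
--             while i < n:
--                 if _is_word_char(chunk[i]):
--                     j = i + 1
--                     while j < n and _is_word_char(chunk[j]):
--                         j += 1
--                     sent.append(chunk[i:j])
--                     i = j
--                 else:
--                     sent.append(chunk[i])
--                     i += 1
--         tokens.append(sent)
--     return tokens
-- ===== Notes on version B (the rewrite author's own statement) =====
-- stated objective: alternative
-- what changed: Replaces A's single buffered char-by-char scan (flush-on-whitespace with a mutable buffer) by a two-phase pass: split the line on whitespace runs with str.split(), then cut each chunk into maximal word-char spans and single non-word characters by index scanning.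
import Mathlib
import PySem

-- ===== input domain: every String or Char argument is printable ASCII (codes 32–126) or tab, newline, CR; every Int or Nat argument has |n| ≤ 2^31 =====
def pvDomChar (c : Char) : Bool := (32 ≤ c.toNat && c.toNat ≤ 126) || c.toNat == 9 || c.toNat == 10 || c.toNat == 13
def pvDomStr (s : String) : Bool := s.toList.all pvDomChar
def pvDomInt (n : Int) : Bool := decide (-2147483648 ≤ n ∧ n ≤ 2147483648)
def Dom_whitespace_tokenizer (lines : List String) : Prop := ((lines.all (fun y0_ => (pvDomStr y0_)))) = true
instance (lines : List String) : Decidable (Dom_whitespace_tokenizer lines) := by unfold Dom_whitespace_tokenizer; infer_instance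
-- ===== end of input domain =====

-- B replaces A's buffered char-by-char scan by a two-phase pass (split on whitespace runs,
-- then cut each chunk into word-char spans and single non-word chars); same cost, different decomposition.

-- ===== PORT A =====
-- _is_word_char: unicodedata.category(ch)[0] in {"L","M","N"}; on the ASCII domain this is
-- exactly isalnum (letters A-Z a-z are L*, digits 0-9 are N*; no ASCII M* characters).
def pvIsWord (c : Char) : Bool := PySem.Chars.isalnum c

-- the body of A's inner `for ch in line` loop, state = (buf, sent)
def pvStepA (st : List Char × List String) (ch : Char) : List Char × List String :=
  if PySem.Chars.isspace ch then
    if st.1 = [] then st else ([], st.2 ++ [String.ofList st.1])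
  else if pvIsWord ch then
    (st.1 ++ [ch], st.2)
  else if st.1 = [] then
    (st.1, st.2 ++ [String.ofList [ch]])
  else
    ([], st.2 ++ [String.ofList st.1] ++ [String.ofList [ch]])

def pvLineA (line : String) : List String :=
  let st := line.toList.foldl pvStepA ([], [])
  if st.1 = [] then st.2 else st.2 ++ [String.ofList st.1]

def whitespace_tokenizer (lines : List String) : List (List String) :=
  lines.map pvLineA

-- ===== PORT B =====
-- Source B's inner index loop over one whitespace-free chunk: a word char opens a maximal
-- word-char span (the `while j < n` scan = takeWhile/dropWhile), anything else is a 1-char token.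
def pvChunkTokens : List Char → List String
  | [] => []
  | c :: rest =>
    if pvIsWord c then
      String.ofList (c :: rest.takeWhile pvIsWord) :: pvChunkTokens (rest.dropWhile pvIsWord)
    else
      String.ofList [c] :: pvChunkTokens rest
  termination_by cs => cs.length
  decreasing_by
    · simp only [List.length_cons]; exact Nat.lt_succ_of_le (rest.length_dropWhile_le pvIsWord)
    · simp

def whitespace_tokenizer_alt (lines : List String) : List (List String) :=
  lines.map (fun line => (PySem.Str.split₀ line).flatMap (fun chunk => pvChunkTokens chunk.toList))

-- ===== PRECONDITION & SPEC =====
def Spec_whitespace_tokenizer (lines : List String) (out : List (List String)) : Prop := out = whitespace_tokenizer_alt lines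
instance (lines : List String) (out : List (List String)) : Decidable (Spec_whitespace_tokenizer lines out) := by unfold Spec_whitespace_tokenizer; infer_instance

-- ===== CLAIM (what is proved, stated in full; the proofs are below) =====
def Claim_equal_whitespace_tokenizer : Prop := ∀ (lines : List String), Dom_whitespace_tokenizer lines → Spec_whitespace_tokenizer lines (whitespace_tokenizer lines)

-- ===== LEMMAS AND PROOFS =====

-- non-space test (what line.split() splits on)
def pvNsp (c : Char) : Bool := !PySem.Chars.isspace c

-- whitespace-run splitting, structurally
def pvWords : List Char → List (List Char)
  | [] => []
  | c :: rest =>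
    if PySem.Chars.isspace c then pvWords rest
    else (c :: rest.takeWhile pvNsp) :: pvWords (rest.dropWhile pvNsp)
  termination_by cs => cs.length
  decreasing_by
    · simp
    · simp only [List.length_cons]; exact Nat.lt_succ_of_le (rest.length_dropWhile_le pvNsp)

-- the common reference tokenization of one line
def pvTok : List Char → List String
  | [] => []
  | c :: rest =>
    if PySem.Chars.isspace c then pvTok rest
    else if pvIsWord c then
      String.ofList (c :: rest.takeWhile pvIsWord) :: pvTok (rest.dropWhile pvIsWord)
    else
      String.ofList [c] :: pvTok rest
  termination_by cs => cs.length
  decreasing_by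
    · simp
    · simp only [List.length_cons]; exact Nat.lt_succ_of_le (rest.length_dropWhile_le pvIsWord)
    · simp

def pvFlush (l : List Char) : List String :=
  if l = [] then [] else [String.ofList l]

-- a word character is never whitespace
theorem pvWord_not_space (c : Char) (h : pvIsWord c = true) : PySem.Chars.isspace c = false := by
  simp only [pvIsWord, PySem.Chars.isalnum, PySem.Chars.isalpha, PySem.Chars.isdigit,
    PySem.Chars.isupper, PySem.Chars.islower, Char.le_def, Bool.or_eq_true, Bool.and_eq_true,
    decide_eq_true_eq, UInt32.le_iff_toNat_le] at h
  simp only [PySem.Chars.isspace, Bool.or_eq_false_iff, Bool.and_eq_false_iff,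
    decide_eq_false_iff_not, Char.toNat]
  have h0 : ('0' : Char).val.toNat = 48 := rfl
  have h9 : ('9' : Char).val.toNat = 57 := rfl
  have hA : ('A' : Char).val.toNat = 65 := rfl
  have hZ : ('Z' : Char).val.toNat = 90 := rfl
  have ha : ('a' : Char).val.toNat = 97 := rfl
  have hz : ('z' : Char).val.toNat = 122 := rfl
  omega

theorem pvSpace_not_word (c : Char) (h : PySem.Chars.isspace c = true) : pvIsWord c = false := by
  cases hw : pvIsWord c with
  | false => rfl
  | true => rw [pvWord_not_space c hw] at h; exact absurd h (by simp)

theorem pvTok_eq (cs : List Char) :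
    pvTok cs = pvFlush (cs.takeWhile pvIsWord) ++ pvTok (cs.dropWhile pvIsWord) := by
  cases cs with
  | nil => simp [pvTok, pvFlush]
  | cons c rest =>
    by_cases hs : PySem.Chars.isspace c = true
    · rw [pvTok]
      simp [hs, List.takeWhile_cons, List.dropWhile_cons, pvSpace_not_word c hs, pvFlush, pvTok]
    · by_cases hw : pvIsWord c = true
      · rw [pvTok]
        simp [hs, hw, List.takeWhile_cons, List.dropWhile_cons, pvFlush]
      · rw [pvTok]
        simp [hs, hw, List.takeWhile_cons, List.dropWhile_cons, pvFlush, pvTok]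

def pvFinish (st : List Char × List String) : List String :=
  if st.1 = [] then st.2 else st.2 ++ [String.ofList st.1]

-- head of a dropWhile fails the predicate
theorem pvHead_dropWhile (p : Char → Bool) (l : List Char) (d : Char)
    (h : (l.dropWhile p).head? = some d) : p d = false := by
  induction l with
  | nil => simp at h
  | cons a l ih =>
    rw [List.dropWhile_cons] at h
    split at h
    · exact ih h
    · simp at h; subst h; simp_all

-- A's loop, characterised
theorem pvA_main (cs : List Char) : ∀ (buf : List Char) (sent : List String),
    pvFinish (cs.foldl pvStepA (buf, sent)) =
      sent ++ pvFlush (buf ++ cs.takeWhile pvIsWord) ++ pvTok (cs.dropWhile pvIsWord) := by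
  induction cs with
  | nil => intro buf sent; by_cases hb : buf = [] <;> simp [hb, pvFlush, pvTok, pvFinish]
  | cons c rest ih =>
    intro buf sent
    rw [List.foldl_cons]
    by_cases hs : PySem.Chars.isspace c = true
    · have hw := pvSpace_not_word c hs
      by_cases hb : buf = []
      · rw [show pvStepA (buf, sent) c = (buf, sent) by simp [pvStepA, hs, hb]]
        rw [ih buf sent, hb]
        simp [hw, hs, pvFlush, pvTok, pvTok_eq rest]
      · rw [show pvStepA (buf, sent) c = ([], sent ++ [String.ofList buf]) by
          simp [pvStepA, hs, hb]]
        rw [ih [] (sent ++ [String.ofList buf])]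
        simp [hw, hs, hb, pvFlush, pvTok, pvTok_eq rest]
    · have hs' : PySem.Chars.isspace c = false := by simpa using hs
      by_cases hw : pvIsWord c = true
      · rw [show pvStepA (buf, sent) c = (buf ++ [c], sent) by simp [pvStepA, hs', hw]]
        rw [ih (buf ++ [c]) sent]
        simp [hw, hs']
      · have hw' : pvIsWord c = false := by simpa using hw
        by_cases hb : buf = []
        · rw [show pvStepA (buf, sent) c = (buf, sent ++ [String.ofList [c]]) by
            simp [pvStepA, hs', hw', hb]]
          rw [ih buf (sent ++ [String.ofList [c]]), hb]
          simp [hw', hs', pvFlush, pvTok, pvTok_eq rest]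
        · rw [show pvStepA (buf, sent) c = ([], sent ++ [String.ofList buf] ++ [String.ofList [c]]) by
            simp [pvStepA, hs', hw', hb]]
          rw [ih [] (sent ++ [String.ofList buf] ++ [String.ofList [c]])]
          simp [hw', hs', hb, pvFlush, pvTok, pvTok_eq rest]

theorem pvLineA_eq_tok (line : String) : pvLineA line = pvTok line.toList := by
  have h : pvLineA line = pvFinish (line.toList.foldl pvStepA ([], [])) := rfl
  rw [h, pvA_main line.toList [] []]
  rw [pvTok_eq line.toList]
  simp

-- split₀.go with a pending accumulator
theorem pvGoAcc (cs : List Char) : ∀ (cur : List Char) (acc : List (List Char)),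
    PySem.Chars.split₀.go cs cur acc = acc.reverse ++ PySem.Chars.split₀.go cs cur [] := by
  induction cs with
  | nil =>
    intro cur acc
    by_cases hc : cur.isEmpty = true <;> simp [PySem.Chars.split₀.go, hc]
  | cons c rest ih =>
    intro cur acc
    by_cases hs : PySem.Chars.isspace c = true
    · by_cases hc : cur.isEmpty = true
      · simp only [PySem.Chars.split₀.go, hs, hc, if_true]
        exact ih [] acc
      · simp only [PySem.Chars.split₀.go, hs, hc, if_true, if_false]
        rw [ih [] (cur.reverse :: acc), ih [] [cur.reverse]]
        simp
    · simp only [PySem.Chars.split₀.go, hs, if_false]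
      exact ih (c :: cur) acc

theorem pvGo_words (cs : List Char) : ∀ (cur : List Char),
    PySem.Chars.split₀.go cs cur [] =
      if cur = [] then pvWords cs
      else (cur.reverse ++ cs.takeWhile pvNsp) :: pvWords (cs.dropWhile pvNsp) := by
  induction cs with
  | nil =>
    intro cur
    by_cases hc : cur = [] <;> simp [PySem.Chars.split₀.go, hc, pvWords]
  | cons c rest ih =>
    intro cur
    by_cases hs : PySem.Chars.isspace c = true
    · by_cases hc : cur = []
      · simp only [PySem.Chars.split₀.go, hs, hc, List.isEmpty_nil, if_true]
        rw [ih [], pvWords]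
        simp [hs, hc]
      · have : cur.isEmpty = false := by simpa [List.isEmpty_iff] using hc
        simp only [PySem.Chars.split₀.go, hs, this, if_true, Bool.false_eq_true, if_false]
        rw [pvGoAcc, ih []]
        simp only [if_pos rfl, List.reverse_cons, List.reverse_nil, List.nil_append]
        simp [hc, List.takeWhile_cons, List.dropWhile_cons, pvNsp, hs,
          show pvWords (c :: rest) = pvWords rest from by rw [pvWords]; simp [hs]]
    · simp only [PySem.Chars.split₀.go, hs, if_false]
      rw [ih (c :: cur)]
      simp only [List.cons_ne_self, if_neg (List.cons_ne_nil c cur)]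
      by_cases hc : cur = []
      · subst hc
        rw [pvWords]
        simp [hs, List.takeWhile_cons, List.dropWhile_cons, pvNsp]
      · simp [hc, List.takeWhile_cons, List.dropWhile_cons, pvNsp, hs]

theorem pvSplit₀_eq_words (cs : List Char) : PySem.Chars.split₀ cs = pvWords cs := by
  rw [PySem.Chars.split₀]
  rw [pvGo_words cs []]
  simp

-- tokenizing a whitespace-free chunk glued onto a space-headed remainder splits
theorem pvTok_chunk (n : Nat) : ∀ (chunk cs : List Char), chunk.length ≤ n →
    (∀ c ∈ chunk, PySem.Chars.isspace c = false) →
    (∀ d, cs.head? = some d → PySem.Chars.isspace d = true) →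
    pvTok (chunk ++ cs) = pvChunkTokens chunk ++ pvTok cs := by
  induction n with
  | zero =>
    intro chunk cs hlen _ _
    have : chunk = [] := List.length_eq_zero_iff.mp (Nat.le_zero.mp hlen)
    simp [this, pvChunkTokens]
  | succ n ih =>
    intro chunk cs hlen hns hcs
    cases chunk with
    | nil => simp [pvChunkTokens]
    | cons c ch =>
      have hcns : PySem.Chars.isspace c = false := hns c (by simp)
      have hchns : ∀ x ∈ ch, PySem.Chars.isspace x = false :=
        fun x hx => hns x (List.mem_cons_of_mem c hx)
      by_cases hw : pvIsWord c = true
      · -- the head of cs (if any) is a space, hence not a word char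
        rw [List.cons_append, pvTok]
        simp only [hcns, Bool.false_eq_true, if_false, hw, if_true]
        rw [pvChunkTokens]
        simp only [hw, if_true]
        have htake : (ch ++ cs).takeWhile pvIsWord = ch.takeWhile pvIsWord := by
          rw [List.takeWhile_append]
          split_ifs with h
          · have hall : ch.takeWhile pvIsWord = ch := by
              have := List.takeWhile_prefix (l := ch) (p := pvIsWord)
              exact List.IsPrefix.eq_of_length this h
            rw [hall]
            cases cs with
            | nil => simp
            | cons d ds =>
              have hd := hcs d rfl
              simp [List.takeWhile_cons, pvSpace_not_word d hd]
          · rfl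
        have hdrop : (ch ++ cs).dropWhile pvIsWord = ch.dropWhile pvIsWord ++ cs := by
          rw [List.dropWhile_append]
          split_ifs with h
          · have he : ch.dropWhile pvIsWord = [] := List.isEmpty_iff.mp h
            rw [he, List.nil_append]
            cases cs with
            | nil => simp
            | cons d ds =>
              have hd := hcs d rfl
              rw [List.dropWhile_cons]
              simp [pvSpace_not_word d hd]
          · rfl
        rw [htake, hdrop]
        rw [ih (ch.dropWhile pvIsWord) cs
              (by have := ch.length_dropWhile_le pvIsWord; simp at hlen; omega)
              (fun x hx => hchns x ((List.dropWhile_sublist (p := pvIsWord)).mem hx)) hcs]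
        simp
      · rw [List.cons_append, pvTok]
        simp only [hcns, Bool.false_eq_true, if_false, hw, if_true]
        rw [pvChunkTokens]
        simp only [hw, Bool.false_eq_true, if_false]
        rw [ih ch cs (by simp at hlen; omega) hchns hcs]
        simp

-- the reference tokenization is B's split-then-group
theorem pvTok_words (n : Nat) : ∀ (cs : List Char), cs.length ≤ n →
    pvTok cs = (pvWords cs).flatMap pvChunkTokens := by
  induction n with
  | zero =>
    intro cs hlen
    have : cs = [] := List.length_eq_zero_iff.mp (Nat.le_zero.mp hlen)
    simp [this, pvTok, pvWords]
  | succ n ih =>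
    intro cs hlen
    cases cs with
    | nil => simp [pvTok, pvWords]
    | cons c rest =>
      by_cases hs : PySem.Chars.isspace c = true
      · rw [pvTok, pvWords]
        simp only [hs, if_true]
        exact ih rest (by simp at hlen; omega)
      · rw [pvWords]
        simp only [hs, Bool.false_eq_true, if_false, List.flatMap_cons]
        have hsplit : c :: rest = (c :: rest.takeWhile pvNsp) ++ rest.dropWhile pvNsp := by
          simp [List.takeWhile_append_dropWhile]
        rw [hsplit, pvTok_chunk (c :: rest.takeWhile pvNsp).length _ _ le_rfl
          (by
            intro x hx
            rcases List.mem_cons.mp hx with h | h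
            · subst h; simpa using hs
            · have := List.mem_takeWhile_imp h
              simpa [pvNsp] using this)
          (by
            intro d hd
            have := pvHead_dropWhile pvNsp rest d hd
            simpa [pvNsp] using this)]
        rw [ih (rest.dropWhile pvNsp)
          (by have := rest.length_dropWhile_le pvNsp; simp at hlen; omega)]

-- ===== VERDICT (by name: the statement is the Claim_ definition above) =====
theorem whitespace_tokenizer_spec : Claim_equal_whitespace_tokenizer := by
  intro lines _
  unfold Spec_whitespace_tokenizer whitespace_tokenizer whitespace_tokenizer_alt
  apply List.map_congr_left
  intro line _
  rw [pvLineA_eq_tok]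
  have hsplit : (PySem.Str.split₀ line).map String.toList = PySem.Chars.split₀ line.toList := by
    simp [PySem.Str.split₀_map_toList]
  have : (PySem.Str.split₀ line).flatMap (fun chunk => pvChunkTokens chunk.toList) =
      (PySem.Chars.split₀ line.toList).flatMap pvChunkTokens := by
    rw [← hsplit, List.flatMap_map]
  rw [this, pvSplit₀_eq_words, pvTok_words line.toList.length line.toList le_rfl]
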